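-- pv_equiv track=rewrite | github.com/dantewins/evidence-gated-agent-memory | scripts/compose_official_mem0_random_matched_route.py | _shared_case_keys
-- ===== SOURCE A (Python) =====
-- from typing import Any
--
-- def _shared_case_keys(
--     by_key: dict[tuple[str, str, str], dict[str, Any]],
--     policies: list[str],
-- ) -> list[tuple[str, str]]:
--     shared: set[tuple[str, str]] | None = None
--     for policy in policies:
--         cases = {(category, case_id) for category, case_id, row_policy in by_key if row_policy == policy}
--         shared = cases if shared is None else shared & cases
--     return sorted(shared or set())
-- ===== SOURCE B (Python) =====
-- from typing import Any
--
--
-- def _shared_case_keys(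
--     by_key: dict[tuple[str, str, str], dict[str, Any]],
--     policies: list[str],
-- ) -> list[tuple[str, str]]:
--     # Single pass: group, per case key, the set of policies that mention it;
--     # a key is shared iff its policy set covers all requested policies.
--     have: dict[tuple[str, str], set[str]] = {}
--     for category, case_id, row_policy in by_key:
--         have.setdefault((category, case_id), set()).add(row_policy)
--     if not policies:
--         return []
--     need = set(policies)
--     return sorted(k for k, pols in have.items() if need <= pols)
-- ===== Notes on version B (the rewrite author's own statement) =====
-- stated objective: faster
-- what changed: Instead of rebuilding, for every policy, the set of case keys by scanning the whole dict (A), B makes one pass grouping each case key with the set of policies that mention it and keeps the keys whose policy set covers all requested policies.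
import Mathlib
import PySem

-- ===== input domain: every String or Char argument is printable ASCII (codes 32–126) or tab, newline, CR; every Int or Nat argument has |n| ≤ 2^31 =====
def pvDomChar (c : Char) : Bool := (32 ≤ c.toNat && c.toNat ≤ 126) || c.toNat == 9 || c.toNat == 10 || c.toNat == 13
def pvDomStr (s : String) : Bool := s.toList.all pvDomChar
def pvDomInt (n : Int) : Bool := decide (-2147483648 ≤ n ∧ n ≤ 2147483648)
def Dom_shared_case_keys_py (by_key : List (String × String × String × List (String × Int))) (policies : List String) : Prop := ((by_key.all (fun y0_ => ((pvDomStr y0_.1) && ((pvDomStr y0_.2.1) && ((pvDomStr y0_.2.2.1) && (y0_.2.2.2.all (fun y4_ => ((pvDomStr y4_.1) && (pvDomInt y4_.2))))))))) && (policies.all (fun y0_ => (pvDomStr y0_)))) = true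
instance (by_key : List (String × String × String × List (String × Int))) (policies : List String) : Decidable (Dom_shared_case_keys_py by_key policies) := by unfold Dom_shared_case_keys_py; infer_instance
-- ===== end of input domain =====

-- B groups, in one pass, each case key with the set of policies that mention it and keeps the
-- keys whose set covers all requested policies (objective: faster — O(K+P) passes instead of a
-- scan of by_key per policy).


-- ===== PORT A =====
-- {(category, case_id) for category, case_id, row_policy in by_key if row_policy == policy}
def pvACases (by_key : List (String × String × String × List (String × Int))) (policy : String) : PySem.Set (String × String) :=
  PySem.Set.ofList ((by_key.filter (fun e => e.2.2.1 == policy)).map (fun e => (e.1, e.2.1)))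

def shared_case_keys_py (by_key : List (String × String × String × List (String × Int))) (policies : List String) : List (String × String) :=
  let shared : Option (PySem.Set (String × String)) :=
    policies.foldl (fun shared policy =>
      let cases := pvACases by_key policy
      match shared with
      | none => some cases
      | some s => some (PySem.Set.inter s cases)) none
  -- sorted(shared or set()): `shared or set()` replaces None (or an empty set, which already
  -- sorts to []) by set(); Python's default tuple sort is sorted2 on (fst, snd)
  PySem.List.sorted2 (shared.getD PySem.Set.empty) (fun x => x.1) (fun x => x.2)

-- ===== PORT B =====
def shared_case_keys_py_alt (by_key : List (String × String × String × List (String × Int))) (policies : List String) : List (String × String) :=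
  -- have.setdefault((category, case_id), set()).add(row_policy)
  let haveD : PySem.Dict (String × String) (PySem.Set String) :=
    by_key.foldl (fun d e =>
      PySem.Dict.insert d (e.1, e.2.1) (PySem.Set.add (PySem.Dict.getD d (e.1, e.2.1) PySem.Set.empty) e.2.2.1))
      PySem.Dict.empty
  if policies.isEmpty then []
  else
    let need : PySem.Set String := PySem.Set.ofList policies
    PySem.List.sorted2 ((PySem.Dict.items haveD).filterMap
      (fun kp => if PySem.Set.issubset need kp.2 then some kp.1 else none))
      (fun x => x.1) (fun x => x.2)

-- ===== PRECONDITION & SPEC =====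
def Spec_shared_case_keys_py (by_key : List (String × String × String × List (String × Int))) (policies : List String) (out : List (String × String)) : Prop := out = shared_case_keys_py_alt by_key policies
instance (by_key : List (String × String × String × List (String × Int))) (policies : List String) (out : List (String × String)) : Decidable (Spec_shared_case_keys_py by_key policies out) := by unfold Spec_shared_case_keys_py; infer_instance

-- ===== CLAIM (what is proved, stated in full; the proofs are below) =====
def Claim_equal_shared_case_keys_py : Prop := ∀ (by_key : List (String × String × String × List (String × Int))) (policies : List String), Dom_shared_case_keys_py by_key policies → Spec_shared_case_keys_py by_key policies (shared_case_keys_py by_key policies)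

-- ===== LEMMAS AND PROOFS =====

-- the strict comparison Python's tuple sort uses, specialised to pairs
def pvBefore (a b : String × String) : Bool :=
  decide (a.1 < b.1) || (!decide (b.1 < a.1) && decide (a.2 < b.2))

theorem pvBefore_iff (a b : String × String) :
    pvBefore a b = true ↔ a.1 < b.1 ∨ (¬ b.1 < a.1 ∧ a.2 < b.2) := by
  simp [pvBefore]

theorem pvBefore_asymm {a b : String × String} (h : pvBefore a b = true) :
    pvBefore b a = false := by
  rw [pvBefore_iff] at h
  rw [Bool.eq_false_iff, Ne, pvBefore_iff]
  rcases h with h | ⟨h1, h2⟩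
  · rintro (h' | ⟨h1', _⟩)
    · exact absurd h (lt_asymm h')
    · exact h1' h
  · rintro (h' | ⟨_, h2'⟩)
    · exact h1 h'
    · exact absurd h2 (lt_asymm h2')

theorem pvBefore_trans {a b c : String × String}
    (hab : pvBefore a b = true) (hbc : pvBefore b c = true) : pvBefore a c = true := by
  rw [pvBefore_iff] at hab hbc ⊢
  rcases hab with h | ⟨h1, h2⟩ <;> rcases hbc with h' | ⟨h1', h2'⟩
  · exact Or.inl (lt_trans h h')
  · exact Or.inl (lt_of_lt_of_le h (le_of_not_gt h1'))
  · exact Or.inl (lt_of_le_of_lt (le_of_not_gt h1) h')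
  · refine Or.inr ⟨fun hca => h1' (lt_of_lt_of_le hca (le_of_not_gt h1)), lt_trans h2 h2'⟩

theorem pvBefore_connex {a b : String × String}
    (h1 : pvBefore a b = false) (h2 : pvBefore b a = false) : a = b := by
  rw [Bool.eq_false_iff, Ne, pvBefore_iff] at h1 h2
  push_neg at h1 h2
  have hf : a.1 = b.1 := le_antisymm h2.1 h1.1
  have hs : a.2 = b.2 := le_antisymm (h2.2 h1.1) (h1.2 h2.1)
  exact Prod.ext hf hs

-- Pairwise order maintained by insertBy
theorem pairwise_insertBy (x : String × String) (l : List (String × String))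
    (h : l.Pairwise (fun a b => pvBefore b a = false)) :
    (PySem.List.insertBy pvBefore x l).Pairwise (fun a b => pvBefore b a = false) := by
  induction l with
  | nil => simp [PySem.List.insertBy]
  | cons y ys ih =>
    rw [List.pairwise_cons] at h
    by_cases hxy : pvBefore x y = true
    · show (PySem.List.insertBy pvBefore x (y :: ys)).Pairwise _
      simp only [PySem.List.insertBy, hxy, if_pos]
      refine List.pairwise_cons.mpr ⟨?_, List.pairwise_cons.mpr h⟩
      intro z hz
      rcases List.mem_cons.mp hz with rfl | hz'
      · exact pvBefore_asymm hxy
      · rcases Bool.eq_false_or_eq_true (pvBefore z x) with ht | hf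
        · exact absurd (pvBefore_trans ht hxy) (by simp [h.1 z hz'])
        · exact hf
    · have hxy' : pvBefore x y = false := Bool.eq_false_iff.mpr hxy
      show (PySem.List.insertBy pvBefore x (y :: ys)).Pairwise _
      simp only [PySem.List.insertBy, hxy', Bool.false_eq_true, if_neg, not_false_iff]
      refine List.pairwise_cons.mpr ⟨?_, ih h.2⟩
      intro z hz
      rcases (PySem.List.mem_insertBy pvBefore x z ys).mp hz with rfl | hz
      · exact hxy'
      · exact h.1 z hz

theorem insertBy_perm (x : String × String) (l : List (String × String)) :
    (PySem.List.insertBy pvBefore x l).Perm (x :: l) := by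
  induction l with
  | nil => simp [PySem.List.insertBy]
  | cons y ys ih =>
    by_cases hxy : pvBefore x y = true
    · simp [PySem.List.insertBy, hxy]
    · have hxy' : pvBefore x y = false := Bool.eq_false_iff.mpr hxy
      simp only [PySem.List.insertBy, hxy', Bool.false_eq_true, if_neg, not_false_iff]
      exact ((ih.cons y).trans (List.Perm.swap x y ys))

theorem foldl_insertBy_perm (xs acc : List (String × String)) :
    (xs.foldl (fun a x => PySem.List.insertBy pvBefore x a) acc).Perm (acc ++ xs) := by
  induction xs generalizing acc with
  | nil => simp
  | cons x xs ih =>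
    refine (ih (PySem.List.insertBy pvBefore x acc)).trans ?_
    refine (List.Perm.append_right xs (insertBy_perm x acc)).trans ?_
    simpa using (List.perm_middle (a := x) (l₁ := acc) (l₂ := xs)).symm

theorem foldl_insertBy_pairwise (xs acc : List (String × String))
    (h : acc.Pairwise (fun a b => pvBefore b a = false)) :
    (xs.foldl (fun a x => PySem.List.insertBy pvBefore x a) acc).Pairwise
      (fun a b => pvBefore b a = false) := by
  induction xs generalizing acc with
  | nil => exact h
  | cons x xs ih => exact ih _ (pairwise_insertBy x acc h)

theorem sorted2_eq_foldl (xs : List (String × String)) :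
    PySem.List.sorted2 xs (fun x => x.1) (fun x => x.2) =
      xs.foldl (fun a x => PySem.List.insertBy pvBefore x a) [] := rfl

-- sorted() of two lists with the same distinct elements is the same list
theorem sorted2_canon {xs ys : List (String × String)} (h : xs.Perm ys) :
    PySem.List.sorted2 xs (fun x => x.1) (fun x => x.2) =
      PySem.List.sorted2 ys (fun x => x.1) (fun x => x.2) := by
  rw [sorted2_eq_foldl, sorted2_eq_foldl]
  have p1 := foldl_insertBy_perm xs []
  have p2 := foldl_insertBy_perm ys []
  simp only [List.nil_append] at p1 p2
  exact List.eq_of_perm_of_sorted (le := fun a b => pvBefore b a = false)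
    (fun a b _ _ hab hba => pvBefore_connex hba hab)
    (foldl_insertBy_pairwise xs [] List.Pairwise.nil)
    (foldl_insertBy_pairwise ys [] List.Pairwise.nil)
    (p1.trans (h.trans p2.symm))

-- ---- A side ----

theorem mem_pvACases (by_key : List (String × String × String × List (String × Int)))
    (p : String) (x : String × String) :
    x ∈ pvACases by_key p ↔ ∃ e ∈ by_key, e.2.2.1 = p ∧ (e.1, e.2.1) = x := by
  unfold pvACases
  rw [PySem.Set.mem_ofList]
  simp only [List.mem_map, List.mem_filter, beq_iff_eq]
  constructor
  · rintro ⟨e, ⟨he, hp⟩, hx⟩; exact ⟨e, he, hp, hx⟩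
  · rintro ⟨e, he, hp, hx⟩; exact ⟨e, ⟨he, hp⟩, hx⟩

theorem nodup_pvACases (by_key : List (String × String × String × List (String × Int)))
    (p : String) : (pvACases by_key p).Nodup := PySem.Set.nodup_ofList _

def pvAStep (by_key : List (String × String × String × List (String × Int)))
    (shared : Option (PySem.Set (String × String))) (policy : String) :
    Option (PySem.Set (String × String)) :=
  match shared with
  | none => some (pvACases by_key policy)
  | some s => some (PySem.Set.inter s (pvACases by_key policy))

theorem foldl_pvAStep_some (by_key : List (String × String × String × List (String × Int)))
    (ps : List String) (s : PySem.Set (String × String)) :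
    ps.foldl (pvAStep by_key) (some s) =
      some (ps.foldl (fun s p => PySem.Set.inter s (pvACases by_key p)) s) := by
  induction ps generalizing s with
  | nil => rfl
  | cons p ps ih => exact ih _

theorem mem_foldl_inter (by_key : List (String × String × String × List (String × Int)))
    (ps : List String) (s : PySem.Set (String × String)) (x : String × String) :
    x ∈ ps.foldl (fun s p => PySem.Set.inter s (pvACases by_key p)) s ↔
      x ∈ s ∧ ∀ p ∈ ps, x ∈ pvACases by_key p := by
  induction ps generalizing s with
  | nil => simp
  | cons p ps ih =>
    simp only [List.foldl_cons, ih, PySem.Set.mem_inter, List.mem_cons]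
    constructor
    · rintro ⟨⟨hs, hc⟩, hall⟩
      exact ⟨hs, fun q hq => hq.elim (fun h => h ▸ hc) (hall q)⟩
    · rintro ⟨hs, hall⟩
      exact ⟨⟨hs, hall p (Or.inl rfl)⟩, fun q hq => hall q (Or.inr hq)⟩

theorem nodup_foldl_inter (by_key : List (String × String × String × List (String × Int)))
    (ps : List String) (s : PySem.Set (String × String)) (hs : s.Nodup) :
    (ps.foldl (fun s p => PySem.Set.inter s (pvACases by_key p)) s).Nodup := by
  induction ps generalizing s with
  | nil => exact hs
  | cons p ps ih => exact ih _ (List.Nodup.filter _ hs)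

-- ---- B side ----

def pvBStep (d : PySem.Dict (String × String) (PySem.Set String))
    (e : String × String × String × List (String × Int)) :
    PySem.Dict (String × String) (PySem.Set String) :=
  PySem.Dict.insert d (e.1, e.2.1) (PySem.Set.add (PySem.Dict.getD d (e.1, e.2.1) PySem.Set.empty) e.2.2.1)

theorem mem_getD_foldl_pvBStep (l : List (String × String × String × List (String × Int)))
    (d : PySem.Dict (String × String) (PySem.Set String)) (k : String × String) (p : String) :
    p ∈ (l.foldl pvBStep d).getD k PySem.Set.empty ↔
      p ∈ d.getD k PySem.Set.empty ∨ ∃ e ∈ l, (e.1, e.2.1) = k ∧ e.2.2.1 = p := by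
  induction l generalizing d with
  | nil => simp
  | cons e l ih =>
    simp only [List.foldl_cons, ih, List.mem_cons]
    unfold pvBStep
    rw [PySem.Dict.getD_insert]
    by_cases hk : k = (e.1, e.2.1)
    · rw [if_pos hk, PySem.Set.mem_add]
      subst hk
      constructor
      · rintro ((h | h) | h)
        · exact Or.inl h
        · exact Or.inr ⟨e, Or.inl rfl, rfl, h.symm⟩
        · exact Or.inr (h.imp (fun e' h' => ⟨Or.inr h'.1, h'.2⟩))
      · rintro (h | ⟨e', he', hke', hpe'⟩)
        · exact Or.inl (Or.inl h)
        · rcases he' with rfl | he'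
          · exact Or.inl (Or.inr hpe'.symm)
          · exact Or.inr ⟨e', he', hke', hpe'⟩
    · rw [if_neg hk]
      constructor
      · rintro (h | h)
        · exact Or.inl h
        · exact Or.inr (h.imp (fun e' h' => ⟨Or.inr h'.1, h'.2⟩))
      · rintro (h | ⟨e', he', hke', hpe'⟩)
        · exact Or.inl h
        · rcases he' with rfl | he'
          · exact absurd hke'.symm hk
          · exact Or.inr ⟨e', he', hke', hpe'⟩

theorem keys_foldl_pvBStep (l : List (String × String × String × List (String × Int))) :
    (l.foldl pvBStep PySem.Dict.empty).keys =
      PySem.Set.ofList (l.map (fun e => (e.1, e.2.1))) := by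
  have := PySem.Dict.keys_foldl_insert_key l (fun e => (e.1, e.2.1))
    (fun d e => PySem.Set.add (PySem.Dict.getD d (e.1, e.2.1) PySem.Set.empty) e.2.2.1)
    PySem.Dict.empty
  rw [show (l.foldl pvBStep PySem.Dict.empty) = l.foldl (fun d e => PySem.Dict.insert d (e.1, e.2.1) (PySem.Set.add (PySem.Dict.getD d (e.1, e.2.1) PySem.Set.empty) e.2.2.1)) PySem.Dict.empty from rfl]
  rw [this, PySem.Dict.keys_empty, PySem.Set.update_nil_left]

theorem nodup_keys_foldl_pvBStep (l : List (String × String × String × List (String × Int))) :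
    (l.foldl pvBStep PySem.Dict.empty).keys.Nodup := by
  rw [keys_foldl_pvBStep]; exact PySem.Set.nodup_ofList _


-- bridge the anonymous loop bodies in the ports to the named steps
theorem shared_case_keys_py_eq (by_key : List (String × String × String × List (String × Int)))
    (policies : List String) :
    shared_case_keys_py by_key policies =
      PySem.List.sorted2 ((policies.foldl (pvAStep by_key) none).getD PySem.Set.empty)
        (fun x => x.1) (fun x => x.2) := rfl

theorem shared_case_keys_py_alt_eq (by_key : List (String × String × String × List (String × Int)))
    (policies : List String) :
    shared_case_keys_py_alt by_key policies =
      (if policies.isEmpty then [] else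
        PySem.List.sorted2 (((by_key.foldl pvBStep PySem.Dict.empty).items).filterMap
          (fun kp => if PySem.Set.issubset (PySem.Set.ofList policies) kp.2 then some kp.1 else none))
          (fun x => x.1) (fun x => x.2)) := rfl

theorem filterMap_if_eq_filter {a : Type} (c : a -> Bool) (l : List a) :
    l.filterMap (fun x => if c x then some x else none) = l.filter c := by
  induction l with
  | nil => rfl
  | cons x l ih =>
    by_cases hx : c x = true
    · simp [hx, ih]
    · simp [Bool.eq_false_iff.mpr hx, ih]

-- ===== VERDICT (by name: the statement is the Claim_ definition above) =====
theorem shared_case_keys_py_spec : Claim_equal_shared_case_keys_py := by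
  intro by_key policies _
  show shared_case_keys_py by_key policies = shared_case_keys_py_alt by_key policies
  rw [shared_case_keys_py_eq, shared_case_keys_py_alt_eq]
  cases policies with
  | nil => rfl
  | cons p ps =>
    rw [if_neg (by simp)]
    -- the list A sorts
    have hfold : (p :: ps).foldl (pvAStep by_key) none =
        some (ps.foldl (fun s q => PySem.Set.inter s (pvACases by_key q)) (pvACases by_key p)) := by
      rw [List.foldl_cons]
      exact foldl_pvAStep_some by_key ps (pvACases by_key p)
    rw [hfold]
    simp only [Option.getD_some]
    -- the list B sorts, as a filter of the dict's keys
    have hnk := nodup_keys_foldl_pvBStep by_key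
    have hitems := PySem.Dict.items_eq_map_keys (by_key.foldl pvBStep PySem.Dict.empty) hnk
      PySem.Set.empty
    rw [hitems, List.filterMap_map]
    have hcomp : ((fun kp : (String × String) × PySem.Set String =>
          if PySem.Set.issubset (PySem.Set.ofList (p :: ps)) kp.2 then some kp.1 else none) ∘
        (fun k => (k, (by_key.foldl pvBStep PySem.Dict.empty).getD k PySem.Set.empty))) =
        (fun k => if (PySem.Set.issubset (PySem.Set.ofList (p :: ps))
          ((by_key.foldl pvBStep PySem.Dict.empty).getD k PySem.Set.empty)) then some k else none) := rfl
    rw [hcomp, filterMap_if_eq_filter]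
    -- both are sorts of nodup lists with the same membership
    apply sorted2_canon
    rw [List.perm_ext_iff_of_nodup
      (nodup_foldl_inter by_key ps (pvACases by_key p) (nodup_pvACases by_key p))
      (List.Nodup.filter _ hnk)]
    intro x
    rw [mem_foldl_inter, List.mem_filter, keys_foldl_pvBStep]
    constructor
    · rintro ⟨hxp, hxps⟩
      have hall : ∀ q ∈ p :: ps, x ∈ pvACases by_key q := by
        intro q hq
        rcases List.mem_cons.mp hq with rfl | hq
        · exact hxp
        · exact hxps q hq
      obtain ⟨e, he, -, hex⟩ := (mem_pvACases by_key p x).mp hxp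
      refine ⟨?_, ?_⟩
      · rw [PySem.Set.mem_ofList, List.mem_map]
        exact ⟨e, he, hex⟩
      · rw [PySem.Set.issubset_iff]
        intro q hq
        rw [PySem.Set.mem_ofList] at hq
        obtain ⟨e', he', hq', hex'⟩ := (mem_pvACases by_key q x).mp (hall q hq)
        rw [mem_getD_foldl_pvBStep]
        exact Or.inr ⟨e', he', hex', hq'⟩
    · rintro ⟨-, hsub⟩
      rw [PySem.Set.issubset_iff] at hsub
      have hall : ∀ q ∈ p :: ps, x ∈ pvACases by_key q := by
        intro q hq
        have := hsub q (by rw [PySem.Set.mem_ofList]; exact hq)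
        rw [mem_getD_foldl_pvBStep] at this
        rcases this with h | ⟨e, he, hex, hq'⟩
        · simp [PySem.Dict.getD_empty] at h
        · exact (mem_pvACases by_key q x).mpr ⟨e, he, hq', hex⟩
      exact ⟨hall p (List.mem_cons_self), fun q hq => hall q (List.mem_cons_of_mem p hq)⟩
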